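-- pv_equiv track=rewrite | github.com/wuhao4u/InterviewPractice | nineChapters/improbabilityCalculator.py | getRightHalf
-- ===== SOURCE A (Python) =====
-- def getRightHalf(coordinates, remove):
--     while remove > 0:
--         for i, v in enumerate(coordinates):
--             if coordinates[i] > coordinates[i+1]:
--                 del coordinates[i]
--             else:
--                 del coordinates[i+1]
--             break
--         remove -= 1
--     return ''.join(coordinates)
-- ===== SOURCE B (Python) =====
-- def getRightHalf(coordinates, remove):
--     # Note: unlike the original, this does not mutate `coordinates`;
--     # the equivalence claimed is about the return value only.
--     if remove <= 0:
--         return ''.join(coordinates)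
--     if not coordinates:
--         return ''
--     best = coordinates[0]
--     for i in range(1, remove + 1):
--         c = coordinates[i]  # out-of-range remove raises IndexError, as in the original
--         if c < best:
--             best = c
--     return best + ''.join(coordinates[remove + 1:])
-- ===== Notes on version B (the rewrite author's own statement) =====
-- stated objective: faster
-- what changed: Each loop pass of A only compares the first two strings and deletes the larger (ties keep the earlier), so after `remove` passes the head is the first minimum of the first remove+1 strings and the rest is untouched; B finds that minimum with one indexed scan and appends the joined suffix, instead of A's repeated front-of-list deletions.
import Mathlib
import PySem

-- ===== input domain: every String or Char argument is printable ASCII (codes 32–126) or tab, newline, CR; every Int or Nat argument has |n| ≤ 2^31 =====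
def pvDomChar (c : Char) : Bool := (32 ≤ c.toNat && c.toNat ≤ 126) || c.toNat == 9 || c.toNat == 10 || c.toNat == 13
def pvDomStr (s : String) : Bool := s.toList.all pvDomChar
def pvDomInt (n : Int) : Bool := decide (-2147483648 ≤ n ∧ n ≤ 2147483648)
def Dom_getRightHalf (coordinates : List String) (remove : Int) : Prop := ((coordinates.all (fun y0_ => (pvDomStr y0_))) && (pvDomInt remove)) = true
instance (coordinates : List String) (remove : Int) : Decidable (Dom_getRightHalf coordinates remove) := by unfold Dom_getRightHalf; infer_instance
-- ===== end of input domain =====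

-- B replaces A's repeated delete-larger-of-first-two loop by one indexed scan for the
-- minimum of the first remove+1 strings plus the joined suffix (asymptotically faster).
-- A mutates `coordinates` in place; the equivalence proved is about the RETURN value only.

-- ===== PORT A =====
-- the while-loop: each pass compares coordinates[0] and coordinates[1] (IndexError → none
-- when only one element remains; empty list: the for-loop body never runs) and deletes one.
def pvLoopA : List String → Nat → Option (List String)
  | cs, 0 => some cs
  | cs, Nat.succ n =>
    match cs with
    | [] => pvLoopA [] n
    | [_] => none  -- coordinates[i+1] raises IndexError
    | a :: b :: rest => pvLoopA (if a > b then b :: rest else a :: rest) n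

def getRightHalf (coordinates : List String) (remove : Int) : String :=
  match pvLoopA coordinates remove.toNat with
  | some cs => PySem.Str.join "" cs
  | none => ""  -- unreachable under Pre_getRightHalf (IndexError)

-- ===== PORT B =====
-- the for-loop over range(1, remove+1), indexing raising IndexError → none
def pvLoopB (cs : List String) : List Int → String → Option String
  | [], best => some best
  | i :: rest, best =>
    match PySem.List.pyGet? cs i with
    | none => none  -- IndexError
    | some c => pvLoopB cs rest (if c < best then c else best)

def getRightHalf_alt (coordinates : List String) (remove : Int) : String :=
  if remove ≤ 0 then PySem.Str.join "" coordinates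
  else if coordinates.isEmpty then ""
  else
    match PySem.List.pyGet? coordinates 0 with
    | none => ""  -- unreachable: list nonempty
    | some b =>
      match pvLoopB coordinates (PySem.List.pyRange 1 (remove + 1) 1) b with
      | none => ""  -- unreachable under Pre_getRightHalf (IndexError)
      | some best => best ++ PySem.Str.join "" (PySem.List.slice coordinates (some (remove + 1)) none)

-- ===== PRECONDITION & SPEC =====
-- Pre_ excludes exactly the inputs where both Pythons raise IndexError: a nonempty list
-- with remove exceeding len - 1 (the scan runs past the last element).
def Pre_getRightHalf (coordinates : List String) (remove : Int) : Prop :=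
  coordinates = [] ∨ remove ≤ (coordinates.length : Int) - 1
instance (coordinates : List String) (remove : Int) : Decidable (Pre_getRightHalf coordinates remove) := by
  unfold Pre_getRightHalf; infer_instance

def pvWitness_getRightHalf : List String × Int := (["b", "a", "c"], 2)

def Spec_getRightHalf (coordinates : List String) (remove : Int) (out : String) : Prop := out = getRightHalf_alt coordinates remove
instance (coordinates : List String) (remove : Int) (out : String) : Decidable (Spec_getRightHalf coordinates remove out) := by unfold Spec_getRightHalf; infer_instance

-- ===== CLAIM (what is proved, stated in full; the proofs are below) =====
def Claim_equal_getRightHalf : Prop := ∀ (coordinates : List String) (remove : Int), Dom_getRightHalf coordinates remove → Pre_getRightHalf coordinates remove → Spec_getRightHalf coordinates remove (getRightHalf coordinates remove)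

-- ===== LEMMAS AND PROOFS =====

-- After n passes (n ≤ t.length) A's list is: the first minimum of the first n+1
-- elements (A keeps the earlier string on ties, exactly Lean's `min` fold), then the
-- untouched suffix.
lemma pvLoopA_eq (n : Nat) (a : String) (t : List String) (h : n ≤ t.length) :
    pvLoopA (a :: t) n = some ((t.take n).foldl min a :: t.drop n) := by
  induction n generalizing a t with
  | zero => simp [pvLoopA]
  | succ n ih =>
    match t with
    | [] => simp at h
    | b :: t' =>
      have h' : n ≤ t'.length := by simpa using h
      simp only [pvLoopA]
      rcases lt_or_ge b a with hab | hab
      · rw [if_pos hab, ih b t' h']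
        simp [min_def, not_le.mpr hab]
      · rw [if_neg (not_lt.mpr hab), ih a t' h']
        simp [hab]

lemma pvLoopA_nil (n : Nat) : pvLoopA [] n = some [] := by
  induction n with
  | zero => rfl
  | succ n ih => simpa [pvLoopA] using ih

-- B's indexed scan from k over m indices computes the same min-fold over the slice.
lemma pvLoopB_eq (cs : List String) (m : Nat) (k : Int) (hk : 0 ≤ k) (b : String)
    (h : k.toNat + m ≤ cs.length) :
    pvLoopB cs (PySem.List.pyRange k (k + m) 1) b
      = some (((cs.drop k.toNat).take m).foldl min b) := by
  induction m generalizing k b with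
  | zero => simp [pvLoopB, PySem.List.pyRange_one_eq_nil]
  | succ m ih =>
    have hklt : k.toNat < cs.length := by omega
    rw [PySem.List.pyRange_one_cons (by omega)]
    simp only [pvLoopB, PySem.List.pyGet?_of_nonneg _ hk, List.getElem?_eq_getElem hklt]
    have hrw : k + ((m : Nat) + 1 : Nat) = (k + 1) + (m : Nat) := by push_cast; ring
    rw [hrw, ih (k+1) (by omega) _ (by omega)]
    have ht1 : (k+1).toNat = k.toNat + 1 := by omega
    have hdrop : (cs.drop k.toNat).take (m+1) = cs[k.toNat] :: (cs.drop (k.toNat+1)).take m := by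
      rw [List.drop_eq_getElem_cons hklt, List.take_succ_cons]
    rw [ht1, hdrop]
    simp only [List.foldl_cons]
    rcases lt_or_ge cs[k.toNat] b with hc | hc
    · rw [if_pos hc, min_eq_right hc.le]
    · rw [if_neg (not_lt.mpr hc), min_eq_left hc]

lemma pvInterNil (l : List (List Char)) : ([] : List Char).intercalate l = l.flatten := by
  induction l with
  | nil => simp [List.intercalate]
  | cons x xs ih => cases xs <;> simp_all [List.intercalate, List.intersperse]

lemma join_nil : PySem.Str.join "" ([] : List String) = "" := by
  simp [PySem.Str.join, PySem.Chars.join, List.intercalate]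

lemma join_cons (s : String) (l : List String) :
    PySem.Str.join "" (s :: l) = s ++ PySem.Str.join "" l := by
  simp [PySem.Str.join, PySem.Chars.join, pvInterNil]

-- ===== VERDICT (by name: the statement is the Claim_ definition above) =====
theorem getRightHalf_spec : Claim_equal_getRightHalf := by
  intro coordinates remove _ hpre
  unfold Spec_getRightHalf getRightHalf getRightHalf_alt
  by_cases hr : remove ≤ 0
  · have : remove.toNat = 0 := Int.toNat_of_nonpos hr
    simp [this, pvLoopA, hr]
  · rw [if_neg hr]
    match coordinates with
    | [] => simp [pvLoopA_nil, join_nil]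
    | a :: t =>
      rw [if_neg (by simp)]
      have hlen : remove.toNat ≤ t.length := by
        rcases hpre with h | h
        · simp at h
        · simp at h; omega
      have hr' : (0:Int) < remove := lt_of_not_ge hr
      rw [pvLoopA_eq remove.toNat a t hlen]
      have hB : pvLoopB (a :: t) (PySem.List.pyRange 1 (remove + 1) 1) a
          = some ((t.take remove.toNat).foldl min a) := by
        have h1 : remove + 1 = ((1:Int)) + ((remove.toNat : Nat) : Int) := by omega
        rw [h1, pvLoopB_eq (a :: t) remove.toNat 1 (by norm_num) a (by simp; omega)]
        norm_num
      simp only [PySem.List.pyGet?_zero_cons, hB]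
      rw [PySem.List.slice_from _ (by omega : (0:Int) ≤ remove + 1)]
      have h2 : (remove + 1).toNat = remove.toNat + 1 := by omega
      rw [h2]
      simp only [List.drop_succ_cons]
      rw [join_cons]
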